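-- pv_equiv track=rewrite | github.com/alex3287/ege | 2022/25/task_33527.py | is_three_dev
-- ===== SOURCE A (Python) =====
-- def is_three_dev(number):
--     count = 1 if number % 2 == 0 else 0
--     for i in range(2, int(number**0.5)+1):
--         if number % i == 0:
--             if i % 2 == 0:
--                 count += 1
--             if number // i != i and number // i % 2 == 0:
--                 count += 1
--         if count > 3:
--             return False
--     return count == 3
-- ===== SOURCE B (Python) =====
-- def is_three_dev(number):
--     divisors = set()
--     for i in range(1, int(number**0.5) + 1):
--         if number % i == 0:
--             divisors.add(i)
--             divisors.add(number // i)
--     evens = 0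
--     for d in divisors:
--         if d % 2 == 0:
--             evens += 1
--     return evens == 3
-- ===== Notes on version B (the rewrite author's own statement) =====
-- stated objective: alternative
-- what changed: B first collects the complete divisor set by the sqrt(n) pairing i / n//i (the set deduplicating the perfect-square cofactor), then counts even divisors in a second pass, replacing A's single interleaved counter with its duplicate guard and early exit.
import Mathlib
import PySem

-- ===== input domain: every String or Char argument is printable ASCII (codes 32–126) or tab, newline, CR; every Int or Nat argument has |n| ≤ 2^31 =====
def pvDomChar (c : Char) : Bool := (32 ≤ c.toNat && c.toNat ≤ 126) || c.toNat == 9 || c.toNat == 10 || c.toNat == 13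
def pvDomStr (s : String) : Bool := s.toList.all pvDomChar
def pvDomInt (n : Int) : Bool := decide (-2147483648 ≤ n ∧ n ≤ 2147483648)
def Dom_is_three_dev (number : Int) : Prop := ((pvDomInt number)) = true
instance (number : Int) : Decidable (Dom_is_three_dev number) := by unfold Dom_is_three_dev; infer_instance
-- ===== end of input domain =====

-- B builds the full divisor set by sqrt pairing, then counts even divisors in a second pass (alternative
-- decomposition, same asymptotic cost as A's interleaved counter with early exit).

-- ===== PORT A =====
-- A's for-loop with its early `return False`, as structural recursion over the range list.
def isThreeDevLoop (number : Int) (count : Int) : List Int → Bool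
  | [] => count == 3
  | i :: rest =>
      let count1 :=
        if PySem.Int.mod number i == 0 then
          let c := if PySem.Int.mod i 2 == 0 then count + 1 else count
          if (PySem.Int.floordiv number i != i) &&
             (PySem.Int.mod (PySem.Int.floordiv number i) 2 == 0) then c + 1 else c
        else count
      if count1 > 3 then false else isThreeDevLoop number count1 rest

def is_three_dev (number : Int) : Bool :=
  let count : Int := if PySem.Int.mod number 2 == 0 then 1 else 0
  -- int(number**0.5): exact as Nat.sqrt for 0 ≤ number ≤ 2^31 (doubles are exact there); Python raises
  -- TypeError for negative number (complex sqrt), excluded by Pre_.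
  let s : Int := (Nat.sqrt number.toNat : Int)
  isThreeDevLoop number count (PySem.List.pyRange 2 (s + 1) 1)

-- ===== PORT B =====
def is_three_dev_alt (number : Int) : Bool :=
  -- int(number**0.5): exact as Nat.sqrt on the same domain as in port A.
  let s : Int := (Nat.sqrt number.toNat : Int)
  let divisors : PySem.Set Int :=
    (PySem.List.pyRange 1 (s + 1) 1).foldl
      (fun acc i =>
        if PySem.Int.mod number i == 0 then
          PySem.Set.add (PySem.Set.add acc i) (PySem.Int.floordiv number i)
        else acc)
      PySem.Set.empty
  -- second pass: count even elements (order-independent consumption of the set)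
  let evens : Int := divisors.foldl (fun c d => if PySem.Int.mod d 2 == 0 then c + 1 else c) 0
  evens == 3

-- ===== PRECONDITION & SPEC =====
-- Pre_ excludes negative numbers, on which Python's number**0.5 is complex and int() raises TypeError.
def Pre_is_three_dev (number : Int) : Prop := 0 ≤ number
instance (number : Int) : Decidable (Pre_is_three_dev number) := by unfold Pre_is_three_dev; infer_instance
def pvWitness_is_three_dev : Int := 18

def Spec_is_three_dev (number : Int) (out : Bool) : Prop := out = is_three_dev_alt number
instance (number : Int) (out : Bool) : Decidable (Spec_is_three_dev number out) := by unfold Spec_is_three_dev; infer_instance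

-- ===== CLAIM (what is proved, stated in full; the proofs are below) =====
def Claim_equal_is_three_dev : Prop := ∀ (number : Int), Dom_is_three_dev number → Pre_is_three_dev number → Spec_is_three_dev number (is_three_dev number)

-- ===== LEMMAS AND PROOFS =====

-- contribution of index i to A's count (exactly A's per-iteration increments)
def contribA (N i : Int) : Int :=
  if PySem.Int.mod N i == 0 then
    (if PySem.Int.mod i 2 == 0 then (1:Int) else 0) +
    (if (PySem.Int.floordiv N i != i) && (PySem.Int.mod (PySem.Int.floordiv N i) 2 == 0) then (1:Int) else 0)
  else 0

-- B's set after processing i = 1 .. k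
def dAux (N : Int) : Nat → PySem.Set Int
  | 0 => PySem.Set.empty
  | k+1 =>
      if PySem.Int.mod N ((k+1 : Nat) : Int) == 0 then
        PySem.Set.add (PySem.Set.add (dAux N k) ((k+1 : Nat) : Int)) (PySem.Int.floordiv N ((k+1 : Nat) : Int))
      else dAux N k

def evenP (d : Int) : Bool := PySem.Int.mod d 2 == 0

lemma contribA_nonneg (N i : Int) : 0 ≤ contribA N i := by
  unfold contribA; split_ifs <;>· omega

lemma sum_contribA_nonneg (N : Int) (l : List Int) : 0 ≤ (l.map (contribA N)).sum := by
  induction l with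
  | nil => simp
  | cons x t ih => simpa using add_nonneg (contribA_nonneg N x) ih

lemma loopA_eq (N : Int) (l : List Int) (c : Int) :
    isThreeDevLoop N c l = ((c + (l.map (contribA N)).sum) == 3) := by
  induction l generalizing c with
  | nil => simp [isThreeDevLoop]
  | cons i rest ih =>
      have hstep : (if PySem.Int.mod N i == 0 then
          (let cc := if PySem.Int.mod i 2 == 0 then c + 1 else c
           if (PySem.Int.floordiv N i != i) &&
              (PySem.Int.mod (PySem.Int.floordiv N i) 2 == 0) then cc + 1 else cc)
        else c) = c + contribA N i := by
        unfold contribA; split_ifs <;> simp <;> omega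
      rw [isThreeDevLoop]
      simp only [hstep]
      by_cases hgt : c + contribA N i > 3
      · have h4 : 0 ≤ ((rest.map (contribA N)).sum) := sum_contribA_nonneg N rest
        simp only [if_pos hgt]
        have : ¬ (c + (contribA N i + (rest.map (contribA N)).sum) = 3) := by omega
        simp [List.map_cons, List.sum_cons]
        omega
      · simp only [if_neg hgt, ih]
        simp [List.map_cons, List.sum_cons, add_assoc]

lemma foldB_eq_dAux (N : Int) (k : Nat) :
    (PySem.List.pyRange 1 ((k : Int) + 1) 1).foldl
      (fun acc i =>
        if PySem.Int.mod N i == 0 then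
          PySem.Set.add (PySem.Set.add acc i) (PySem.Int.floordiv N i)
        else acc)
      PySem.Set.empty = dAux N k := by
  induction k with
  | zero => simp [PySem.List.pyRange_one_eq_nil, dAux]
  | succ k ih =>
      have h1 : (1:Int) ≤ (k:Int) + 1 := by omega
      have : ((k+1 : Nat) : Int) + 1 = ((k:Int) + 1) + 1 := by push_cast; ring
      rw [this, PySem.List.pyRange_one_succ_right h1, List.foldl_append, ih]
      simp [dAux]

lemma mem_dAux (N : Int) (k : Nat) (d : Int) :
    d ∈ dAux N k ↔ ∃ i : Nat, 1 ≤ i ∧ i ≤ k ∧ PySem.Int.mod N (i : Int) = 0 ∧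
      (d = (i : Int) ∨ d = PySem.Int.floordiv N (i : Int)) := by
  induction k with
  | zero =>
      simp [dAux, PySem.Set.empty]
  | succ k ih =>
      rw [dAux]
      by_cases hmod : PySem.Int.mod N ((k+1 : Nat) : Int) = 0
      · rw [if_pos (by simpa using hmod)]
        rw [PySem.Set.mem_add, PySem.Set.mem_add, ih]
        constructor
        · rintro ((⟨i, h1, h2, h3, h4⟩ | rfl) | rfl)
          · exact ⟨i, h1, by omega, h3, h4⟩
          · exact ⟨k+1, by omega, le_refl _, hmod, Or.inl rfl⟩
          · exact ⟨k+1, by omega, le_refl _, hmod, Or.inr rfl⟩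
        · rintro ⟨i, h1, h2, h3, h4⟩
          by_cases hik : i ≤ k
          · exact Or.inl (Or.inl ⟨i, h1, hik, h3, h4⟩)
          · have : i = k + 1 := by omega
            subst this
            rcases h4 with rfl | rfl
            · exact Or.inl (Or.inr rfl)
            · exact Or.inr rfl
      · rw [if_neg (by simpa using hmod), ih]
        constructor
        · rintro ⟨i, h1, h2, h3, h4⟩; exact ⟨i, h1, by omega, h3, h4⟩
        · rintro ⟨i, h1, h2, h3, h4⟩
          refine ⟨i, h1, ?_, h3, h4⟩
          rcases Nat.lt_or_ge i (k+1) with h | h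
          · omega
          · have : i = k + 1 := by omega
            subst this; exact absurd h3 hmod

lemma add_fresh (s : PySem.Set Int) (x : Int) (h : x ∉ s) : PySem.Set.add s x = s ++ [x] := by
  simp [PySem.Set.add, PySem.Set.contains, h]
lemma add_stale (s : PySem.Set Int) (x : Int) (h : x ∈ s) : PySem.Set.add s x = s := by
  simp [PySem.Set.add, PySem.Set.contains, h]

lemma invariant (N : Int) (hN : 1 ≤ N) (k : Nat) (hk : 1 ≤ k) (hk2 : (k : Int) * (k : Int) ≤ N) :
    ((dAux N k).countP evenP : Int) =
      (if PySem.Int.mod N 2 == 0 then (1:Int) else 0) +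
        ((PySem.List.pyRange 2 ((k : Int) + 1) 1).map (contribA N)).sum := by
  induction k with
  | zero => omega
  | succ k ih =>
    by_cases hk0 : k = 0
    · subst hk0
      -- base case: dAux N 1 = {1, N}
      have hmod1 : PySem.Int.mod N (1:Int) = 0 := (PySem.Int.mod_eq_zero_iff_dvd N 1).mpr (one_dvd N)
      have hfd : PySem.Int.floordiv N 1 = N := by
        rw [PySem.Int.floordiv_eq_ediv_of_pos one_pos]; exact Int.ediv_one N
      have h1 : dAux N 1 = PySem.Set.add ([1] : List Int) N := by
        rw [dAux]
        norm_num [hmod1, hfd]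
        rfl
      have hrange : PySem.List.pyRange 2 (((0+1:Nat):Int) + 1) 1 = [] := by
        apply PySem.List.pyRange_one_eq_nil; norm_num
      rw [h1, hrange]
      by_cases hN1 : N = 1
      · subst hN1
        decide
      · have hfresh : N ∉ ([1] : List Int) := by simp; omega
        rw [add_fresh _ _ hfresh]
        have he1 : evenP 1 = false := by decide
        by_cases h2 : PySem.Int.mod N 2 == 0 <;>
          simp [List.countP_cons, List.countP_nil, evenP]
    · -- step case: k ≥ 1, process j = k+1
      have hk1 : 1 ≤ k := by omega
      have hcast : ((k+1 : Nat) : Int) = (k : Int) + 1 := by push_cast; ring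
      have hj2N : ((k:Int)+1) * ((k:Int)+1) ≤ N := by exact_mod_cast hk2
      have hkk : (k : Int) * (k : Int) ≤ N := by nlinarith
      have ihh := ih hk1 hkk
      have hsplit : PySem.List.pyRange 2 (((k : Int) + 1) + 1) 1
          = PySem.List.pyRange 2 ((k : Int) + 1) 1 ++ [(k : Int) + 1] := by
        rw [PySem.List.pyRange_one_succ_right (by omega : (2:Int) ≤ (k:Int)+1)]
      rw [dAux, hcast, hsplit, List.map_append, List.sum_append]
      set jZ : Int := (k : Int) + 1 with hjZ
      by_cases hmod : PySem.Int.mod N jZ = 0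
      · rw [if_pos (by simpa using hmod)]
        have hdvd : jZ ∣ N := (PySem.Int.mod_eq_zero_iff_dvd N jZ).mp hmod
        have hjpos : 0 < jZ := by omega
        set q : Int := PySem.Int.floordiv N jZ with hq
        have hqe : q = N / jZ := PySem.Int.floordiv_eq_ediv_of_pos hjpos
        have hNq : jZ * q = N := by rw [hqe]; exact Int.mul_ediv_cancel' hdvd
        have hqj : jZ ≤ q := by nlinarith
        -- freshness of jZ
        have hja : jZ ∉ dAux N k := by
          rw [mem_dAux]
          rintro ⟨i, hi1, hik, himod, hd⟩
          have hiZ1 : (1:Int) ≤ (i:Int) := by exact_mod_cast hi1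
          have hiZk : (i:Int) ≤ (k:Int) := by exact_mod_cast hik
          have hidvd : (i:Int) ∣ N := (PySem.Int.mod_eq_zero_iff_dvd N i).mp himod
          have hipos : (0:Int) < i := by omega
          have hir : (i:Int) * (N / (i:Int)) = N := Int.mul_ediv_cancel' hidvd
          have hfdi : PySem.Int.floordiv N (i:Int) = N / (i:Int) := PySem.Int.floordiv_eq_ediv_of_pos hipos
          rcases hd with h | h
          · omega
          · rw [hfdi] at h
            -- N = i * jZ ≤ k * jZ < jZ * jZ ≤ N
            nlinarith [hir, h, hj2N]
        have hqa : q ∉ dAux N k := by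
          rw [mem_dAux]
          rintro ⟨i, hi1, hik, himod, hd⟩
          have hiZ1 : (1:Int) ≤ (i:Int) := by exact_mod_cast hi1
          have hiZk : (i:Int) ≤ (k:Int) := by exact_mod_cast hik
          have hidvd : (i:Int) ∣ N := (PySem.Int.mod_eq_zero_iff_dvd N i).mp himod
          have hipos : (0:Int) < i := by omega
          have hir : (i:Int) * (N / (i:Int)) = N := Int.mul_ediv_cancel' hidvd
          have hfdi : PySem.Int.floordiv N (i:Int) = N / (i:Int) := PySem.Int.floordiv_eq_ediv_of_pos hipos
          rcases hd with h | h
          · omega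
          · rw [hfdi] at h
            have hiq : (i:Int) * q = N := by rw [h]; exact hir
            have : (i:Int) * q = jZ * q := by rw [hiq, hNq]
            have hqpos : (0:Int) < q := by omega
            have : (i:Int) = jZ := by exact mul_right_cancel₀ (by omega) this
            omega
        rw [add_fresh _ _ hja]
        have hcontrib : contribA N jZ =
            (if evenP jZ then (1:Int) else 0) + (if q ≠ jZ ∧ evenP q then (1:Int) else 0) := by
          unfold contribA evenP
          rw [if_pos (by simpa using hmod), ← hq]
          congr 1
          by_cases hqj' : q = jZ
          · simp [hqj']
          · simp [hqj', bne_iff_ne]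
        by_cases hqeq : q = jZ
        · rw [hqeq, add_stale _ _ (by simp)]
          simp only [List.map_cons, List.map_nil, List.sum_cons, List.sum_nil, add_zero]
          rw [hcontrib]
          simp only [List.countP_append, List.countP_cons, List.countP_nil, hqeq]
          push_cast
          rw [ihh]
          by_cases he : evenP jZ <;> simp [he] <;> ring
        · have hqf : q ∉ (dAux N k ++ [jZ]) := by simp [hqa, hqeq]
          rw [add_fresh _ _ hqf]
          simp only [List.map_cons, List.map_nil, List.sum_cons, List.sum_nil, add_zero]
          rw [hcontrib]
          simp only [List.countP_append, List.countP_cons, List.countP_nil]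
          push_cast
          rw [ihh]
          by_cases he : evenP jZ <;> by_cases he2 : evenP q <;>
            simp [he, he2, hqeq] <;> ring
      · rw [if_neg (by simpa using hmod), ihh]
        have : contribA N jZ = 0 := by unfold contribA; rw [if_neg (by simpa using hmod)]
        simp [this]


-- ===== VERDICT (by name: the statement is the Claim_ definition above) =====
theorem is_three_dev_spec : Claim_equal_is_three_dev := by
  intro number hdom hpre
  unfold Spec_is_three_dev
  by_cases h0 : number = 0
  · subst h0; decide
  · have hN : 1 ≤ number := by unfold Pre_is_three_dev at hpre; omega
    have hs1 : 1 ≤ Nat.sqrt number.toNat := Nat.sqrt_pos.mpr (by omega)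
    have hs2 : ((Nat.sqrt number.toNat : Int)) * ((Nat.sqrt number.toNat : Int)) ≤ number := by
      have h := Nat.sqrt_le' number.toNat
      rw [pow_two] at h
      omega
    simp only [is_three_dev, is_three_dev_alt]
    rw [loopA_eq, foldB_eq_dAux number (Nat.sqrt number.toNat),
        PySem.List.foldl_if_add_one (fun d => PySem.Int.mod d 2 == 0)]
    have hcp : (fun d => PySem.Int.mod d 2 == 0) = evenP := rfl
    rw [hcp, invariant number hN (Nat.sqrt number.toNat) hs1 hs2]
    simp
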